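-- pv_equiv track=rewrite | github.com/citation-cosmograph/citation-constellation | phase3.py | _extract_dept
-- ===== SOURCE A (Python) =====
-- def _extract_dept(raw, keywords):
--     """Extract a department-like phrase from a raw affiliation string."""
--     raw_lower = raw.lower()
--     for kw in keywords:
--         if kw in raw_lower:
--             for part in raw.split(","):
--                 if kw in part.lower():
--                     return part.strip().lower()
--     return None
-- ===== SOURCE B (Python) =====
-- def _extract_dept(raw, keywords):
--     """Extract a department-like phrase from a raw affiliation string.
--
--     Single pass over the comma-separated parts, keeping the part that matches
--     the highest-priority (lowest-index) keyword seen so far.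
--     """
--     best_k = len(keywords)
--     best_part = None
--     for part in raw.split(","):
--         pl = part.lower()
--         for i, kw in enumerate(keywords):
--             if i >= best_k:
--                 break
--             if kw in pl:
--                 best_k = i
--                 best_part = part
--                 break
--     if best_part is None:
--         return None
--     return best_part.strip().lower()
-- ===== Notes on version B (the rewrite author's own statement) =====
-- stated objective: alternative
-- what changed: Inverts the loop nesting: instead of scanning keywords outermost and re-splitting/rescanning all parts for each keyword, B makes a single pass over the comma-separated parts, threading a running best (lowest keyword index seen so far) and breaking each inner keyword scan as soon as it can no longer improve.
import Mathlib
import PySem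

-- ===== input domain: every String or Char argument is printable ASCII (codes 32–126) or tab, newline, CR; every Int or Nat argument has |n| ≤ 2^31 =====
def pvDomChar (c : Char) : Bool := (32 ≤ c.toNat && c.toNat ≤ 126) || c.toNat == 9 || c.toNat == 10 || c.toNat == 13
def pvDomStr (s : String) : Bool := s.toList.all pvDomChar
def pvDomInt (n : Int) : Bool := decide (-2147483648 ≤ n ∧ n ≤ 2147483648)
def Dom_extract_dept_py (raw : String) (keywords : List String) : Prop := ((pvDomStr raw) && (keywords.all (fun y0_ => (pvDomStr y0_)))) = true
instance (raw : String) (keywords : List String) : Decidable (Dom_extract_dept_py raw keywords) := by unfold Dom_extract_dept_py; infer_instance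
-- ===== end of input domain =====

-- B inverts A's loop nesting: one pass over the comma parts with a running best keyword index,
-- instead of scanning keywords outermost and re-splitting the string per keyword (objective: alternative).

-- raw.split(",")  (the separator "," is non-empty, so Python's split never raises)
def pySplitComma (raw : String) : List String :=
  (PySem.Chars.splitOn raw.toList [',']).map String.ofList

-- ===== PORT A =====
-- inner loop of A: first comma part whose lowercase contains kw
def findPartA (kw : String) : List String → Option String
  | [] => none
  | p :: ps => if PySem.Str.isIn kw (PySem.Str.lower p) then some p else findPartA kw ps

-- outer loop of A over the keywords
def goA (raw raw_lower : String) : List String → Option String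
  | [] => none
  | kw :: rest =>
    if PySem.Str.isIn kw raw_lower then
      match findPartA kw (pySplitComma raw) with
      | some p => some (PySem.Str.lower (PySem.Str.strip p))
      | none => goA raw raw_lower rest
    else goA raw raw_lower rest

def extract_dept_py (raw : String) (keywords : List String) : Option String :=
  goA raw (PySem.Str.lower raw) keywords

-- ===== PORT B =====
-- B's inner scan: first keyword index i < k with keywords[i] contained in pl (break at i >= k)
def scanKw (pl : String) : List String → Nat → Nat → Option Nat
  | [], _, _ => none
  | kw :: kws, i, k =>
    if k ≤ i then none
    else if PySem.Str.isIn kw pl then some i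
    else scanKw pl kws (i + 1) k

-- B's single pass over the parts, threading (best_k, best_part)
def goB (keywords : List String) : List String → Nat → Option String → Option String
  | [], _, bp => bp
  | p :: ps, k, bp =>
    match scanKw (PySem.Str.lower p) keywords 0 k with
    | some i => goB keywords ps i (some p)
    | none => goB keywords ps k bp

def extract_dept_py_alt (raw : String) (keywords : List String) : Option String :=
  match goB keywords (pySplitComma raw) keywords.length none with
  | some p => some (PySem.Str.lower (PySem.Str.strip p))
  | none => none

-- ===== PRECONDITION & SPEC =====
def Spec_extract_dept_py (raw : String) (keywords : List String) (out : Option String) : Prop := out = extract_dept_py_alt raw keywords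
instance (raw : String) (keywords : List String) (out : Option String) : Decidable (Spec_extract_dept_py raw keywords out) := by unfold Spec_extract_dept_py; infer_instance

-- ===== CLAIM (what is proved, stated in full; the proofs are below) =====
def Claim_equal_extract_dept_py : Prop := ∀ (raw : String) (keywords : List String), Dom_extract_dept_py raw keywords → Spec_extract_dept_py raw keywords (extract_dept_py raw keywords)

-- ===== LEMMAS AND PROOFS =====

-- every piece produced by splitOn is a contiguous substring of the input
theorem splitOn_go_infix (sep s : List Char) :
    ∀ (fuel : Nat) (l cur : List Char) (acc : List (List Char)),
      cur.reverse ++ l <:+: s → (∀ a ∈ acc, a <:+: s) →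
      ∀ q ∈ PySem.Chars.splitOn.go sep fuel l cur acc, q <:+: s := by
  intro fuel
  induction fuel with
  | zero =>
    intro l cur acc h1 h2 q hq
    simp only [PySem.Chars.splitOn.go] at hq
    rw [List.mem_reverse, List.mem_cons] at hq
    rcases hq with rfl | hq
    · exact h1
    · exact h2 _ hq
  | succ fuel ih =>
    intro l cur acc h1 h2 q hq
    cases l with
    | nil =>
      simp only [PySem.Chars.splitOn.go] at hq
      rw [List.mem_reverse, List.mem_cons] at hq
      rcases hq with rfl | hq
      · simpa using h1
      · exact h2 _ hq
    | cons c rest =>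
      simp only [PySem.Chars.splitOn.go] at hq
      by_cases hp : sep.isPrefixOf (c :: rest) = true
      · rw [if_pos hp] at hq
        have hl : (c :: rest) <:+: s :=
          ((List.suffix_append cur.reverse (c :: rest)).isInfix).trans h1
        have hcur : cur.reverse <:+: s :=
          ((List.prefix_append cur.reverse (c :: rest)).isInfix).trans h1
        refine ih _ _ _ ?_ ?_ q hq
        · simpa using ((List.drop_suffix sep.length (c :: rest)).isInfix).trans hl
        · intro a ha
          rcases List.mem_cons.mp ha with rfl | ha
          · exact hcur
          · exact h2 _ ha
      · rw [if_neg hp] at hq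
        exact ih _ _ _ (by simpa using h1) h2 q hq

theorem mem_splitOn_infix (s sep q : List Char)
    (hq : q ∈ PySem.Chars.splitOn s sep) : q <:+: s := by
  unfold PySem.Chars.splitOn at hq
  exact splitOn_go_infix sep s _ s [] [] (by simp) (by simp) q hq

theorem findPartA_some_mem (kw : String) :
    ∀ (ps : List String) (p : String), findPartA kw ps = some p →
      p ∈ ps ∧ PySem.Str.isIn kw (PySem.Str.lower p) = true := by
  intro ps
  induction ps with
  | nil => intro p h; simp [findPartA] at h
  | cons q qs ih =>
    intro p h
    simp only [findPartA] at h
    by_cases hq : PySem.Str.isIn kw (PySem.Str.lower q) = true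
    · rw [if_pos hq] at h
      injection h with h
      subst h
      exact ⟨List.mem_cons_self .., hq⟩
    · rw [if_neg hq] at h
      obtain ⟨hm, hi⟩ := ih p h
      exact ⟨List.mem_cons_of_mem _ hm, hi⟩

-- a keyword found inside a comma part is found inside the whole lowered string
theorem findPartA_some_isIn_raw (kw raw p : String)
    (h : findPartA kw (pySplitComma raw) = some p) :
    PySem.Str.isIn kw (PySem.Str.lower raw) = true := by
  obtain ⟨hm, hi⟩ := findPartA_some_mem kw _ p h
  obtain ⟨q, hq, rfl⟩ := List.mem_map.mp hm
  have hqi : q <:+: raw.toList := mem_splitOn_infix _ _ q hq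
  rw [PySem.Str.isIn_iff_infix] at hi ⊢
  refine hi.trans ?_
  simp only [PySem.Str.toList_lower, PySem.Chars.lower]
  simpa using List.IsInfix.map PySem.Chars.lowerChar hqi

theorem findPartA_none (kw : String) :
    ∀ (ps : List String), findPartA kw ps = none ↔
      ∀ p ∈ ps, PySem.Str.isIn kw (PySem.Str.lower p) = false := by
  intro ps
  induction ps with
  | nil => simp [findPartA]
  | cons q qs ih =>
    simp only [findPartA]
    by_cases hq : PySem.Str.isIn kw (PySem.Str.lower q) = true
    · rw [if_pos hq]
      constructor
      · intro h; exact absurd h (by simp)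
      · intro h
        rw [h q (List.mem_cons_self ..)] at hq
        cases hq
    · rw [if_neg hq]
      rw [Bool.not_eq_true] at hq
      rw [ih, List.forall_mem_cons]
      exact (and_iff_right hq).symm

theorem scanKw_some_le (pl : String) :
    ∀ (kws : List String) (i k j : Nat), scanKw pl kws i k = some j → i ≤ j := by
  intro kws
  induction kws with
  | nil => intro i k j h; simp [scanKw] at h
  | cons kw rest ih =>
    intro i k j h
    simp only [scanKw] at h
    by_cases h1 : k ≤ i
    · rw [if_pos h1] at h; cases h
    · rw [if_neg h1] at h
      by_cases h2 : PySem.Str.isIn kw pl = true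
      · rw [if_pos h2] at h
        injection h with h
        omega
      · rw [if_neg h2] at h
        have := ih (i + 1) k j h
        omega

theorem scanKw_k_zero (pl : String) (kws : List String) (i : Nat) :
    scanKw pl kws i 0 = none := by
  cases kws with
  | nil => simp [scanKw]
  | cons kw rest => simp [scanKw]

theorem goB_k_zero (keywords : List String) :
    ∀ (ps : List String) (bp : Option String), goB keywords ps 0 bp = bp := by
  intro ps
  induction ps with
  | nil => intro bp; simp [goB]
  | cons p rest ih => intro bp; simp only [goB, scanKw_k_zero]; exact ih bp

theorem goB_nil_kws :
    ∀ (ps : List String) (k : Nat) (bp : Option String), goB [] ps k bp = bp := by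
  intro ps
  induction ps with
  | nil => intro k bp; simp [goB]
  | cons p rest ih => intro k bp; simp only [goB, scanKw]; exact ih k bp

theorem scanKw_shift (pl : String) :
    ∀ (kws : List String) (i k : Nat),
      scanKw pl kws (i + 1) (k + 1) = (scanKw pl kws i k).map (· + 1) := by
  intro kws
  induction kws with
  | nil => intro i k; simp [scanKw]
  | cons kw rest ih =>
    intro i k
    simp only [scanKw]
    by_cases h1 : k ≤ i
    · rw [if_pos (show k + 1 ≤ i + 1 by omega), if_pos h1]
      rfl
    · rw [if_neg (show ¬ k + 1 ≤ i + 1 by omega), if_neg h1]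
      by_cases h2 : PySem.Str.isIn kw pl = true
      · rw [if_pos h2, if_pos h2]
        rfl
      · rw [if_neg h2, if_neg h2]
        exact ih (i + 1) k

theorem goB_shift (kw : String) (rest : List String) :
    ∀ (ps : List String), (∀ p ∈ ps, PySem.Str.isIn kw (PySem.Str.lower p) = false) →
      ∀ (k : Nat) (bp : Option String),
        goB (kw :: rest) ps (k + 1) bp = goB rest ps k bp := by
  intro ps
  induction ps with
  | nil => intro _ k bp; simp [goB]
  | cons q qs ih =>
    intro hall k bp
    have hq : PySem.Str.isIn kw (PySem.Str.lower q) = false := hall q (List.mem_cons_self ..)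
    have hqs : ∀ p ∈ qs, PySem.Str.isIn kw (PySem.Str.lower p) = false :=
      fun p hp => hall p (List.mem_cons_of_mem _ hp)
    have hstep : scanKw (PySem.Str.lower q) (kw :: rest) 0 (k + 1)
        = (scanKw (PySem.Str.lower q) rest 0 k).map (· + 1) := by
      simp only [scanKw]
      rw [if_neg (by omega), if_neg (by rw [hq]; simp)]
      exact scanKw_shift _ _ 0 k
    simp only [goB, hstep]
    cases hs : scanKw (PySem.Str.lower q) rest 0 k with
    | none => simpa only [hs, Option.map_none] using ih hqs k bp
    | some j => simpa only [hs, Option.map_some] using ih hqs j (some q)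

theorem goB_found (kw : String) (rest : List String) :
    ∀ (ps : List String) (p : String), findPartA kw ps = some p →
      ∀ (k : Nat) (bp : Option String), 1 ≤ k →
        goB (kw :: rest) ps k bp = some p := by
  intro ps
  induction ps with
  | nil => intro p h; simp [findPartA] at h
  | cons q qs ih =>
    intro p h k bp hk
    simp only [findPartA] at h
    by_cases hq : PySem.Str.isIn kw (PySem.Str.lower q) = true
    · rw [if_pos hq] at h
      injection h with h
      subst h
      have h0 : scanKw (PySem.Str.lower q) (kw :: rest) 0 k = some 0 := by
        simp only [scanKw]
        rw [if_neg (by omega), if_pos hq]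
      simp only [goB, h0]
      exact goB_k_zero _ _ _
    · rw [if_neg hq] at h
      have hs0 : scanKw (PySem.Str.lower q) (kw :: rest) 0 k
          = scanKw (PySem.Str.lower q) rest (0 + 1) k := by
        simp only [scanKw]
        rw [if_neg (by omega), if_neg hq]
      simp only [goB, hs0]
      cases hs : scanKw (PySem.Str.lower q) rest (0 + 1) k with
      | none => exact ih p h k bp hk
      | some j =>
        have hj : 1 ≤ j := scanKw_some_le _ _ _ _ _ hs
        exact ih p h j (some q) hj

theorem main_eq (raw : String) :
    ∀ (kws : List String),
      goA raw (PySem.Str.lower raw) kws =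
        Option.map (fun p => PySem.Str.lower (PySem.Str.strip p))
          (goB kws (pySplitComma raw) kws.length none) := by
  intro kws
  induction kws with
  | nil => simp [goA, goB_nil_kws]
  | cons kw rest ih =>
    cases h : findPartA kw (pySplitComma raw) with
    | some p =>
      have hguard := findPartA_some_isIn_raw kw raw p h
      simp only [goA, hguard, if_true, h]
      rw [show (kw :: rest).length = rest.length + 1 from rfl,
        goB_found kw rest _ p h (rest.length + 1) none (by omega)]
      rfl
    | none =>
      have hall := (findPartA_none kw _).mp h
      have hB : goB (kw :: rest) (pySplitComma raw) (kw :: rest).length none =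
          goB rest (pySplitComma raw) rest.length none := by
        rw [show (kw :: rest).length = rest.length + 1 from rfl]
        exact goB_shift kw rest _ hall rest.length none
      rw [hB]
      simp only [goA, h]
      split_ifs with hg
      · exact ih
      · exact ih

-- ===== VERDICT (by name: the statement is the Claim_ definition above) =====
theorem extract_dept_py_spec : Claim_equal_extract_dept_py := by
  intro raw keywords _
  unfold Spec_extract_dept_py extract_dept_py extract_dept_py_alt
  rw [main_eq raw keywords]
  cases goB keywords (pySplitComma raw) keywords.length none <;> rfl
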